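-- pv_equiv track=rewrite | github.com/myfess/lego | command_center/lego_bluetooth.py | _send_nxt_command
-- ===== SOURCE A (Python) =====
-- from typing import List, Dict
--
-- def _send_nxt_command(mail_box: int, command: int) -> List[int]:
--     """
--     NXT Bluetoth mail box command
--     """
--
--     msg = [0, 9, 0, 5, 0, 0, 0, 0, 0]
--     msg[2] = mail_box - 1
--     tmp = command
--     for i in range(4):
--         msg[4 + i] = tmp & 0xFF
--         tmp = tmp >> 8
--     return msg
-- ===== SOURCE B (Python) =====
-- from typing import List
--
-- def _send_nxt_command(mail_box: int, command: int) -> List[int]: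
--     """NXT Bluetooth mail box command."""
--     def big_endian(n: int, k: int) -> List[int]:
--         # k base-256 digits of n, most significant first, by recursion on k
--         if k == 0:
--             return []
--         return big_endian(n >> 8, k - 1) + [n & 0xFF]
--     return [0, 9, mail_box - 1, 5] + big_endian(command, 4)[::-1] + [0]
-- ===== Notes on version B (the rewrite author's own statement) =====
-- stated objective: alternative
-- what changed: Replaces A's in-place mutation of a preallocated 9-list with a stateful shift loop by pure list concatenation: a recursive helper builds the 4 base-256 digits big-endian (recursing on the remaining count) and the payload is that list reversed between header and trailer literals.
import Mathlib
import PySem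

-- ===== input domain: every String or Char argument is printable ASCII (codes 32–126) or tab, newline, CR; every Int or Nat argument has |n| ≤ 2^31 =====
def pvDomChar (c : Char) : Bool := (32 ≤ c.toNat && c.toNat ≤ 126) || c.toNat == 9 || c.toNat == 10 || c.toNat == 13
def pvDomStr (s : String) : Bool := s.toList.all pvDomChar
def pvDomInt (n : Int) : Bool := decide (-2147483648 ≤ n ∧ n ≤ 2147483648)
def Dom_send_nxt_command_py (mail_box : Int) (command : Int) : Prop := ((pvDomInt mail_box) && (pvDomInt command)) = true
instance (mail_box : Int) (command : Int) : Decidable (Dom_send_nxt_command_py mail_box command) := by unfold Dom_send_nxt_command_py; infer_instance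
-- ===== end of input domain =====

-- B builds the packet by pure concatenation (recursive big-endian digit helper, reversed)
-- instead of A's in-place mutation with a shift loop: a different decomposition, same cost.


-- ===== PORT A =====
-- 'tmp & 0xFF' on a Python int is 'tmp mod 256' and 'tmp >> 8' is floor division by 256
-- (exact two's-complement semantics of Python ints).
def send_nxt_command_py (mail_box : Int) (command : Int) : List Int :=
  let msg : List Int := [0, 9, 0, 5, 0, 0, 0, 0, 0]
  let msg := msg.set 2 (mail_box - 1)
  let st := (List.range 4).foldl
    (fun (st : List Int × Int) i =>
      (st.1.set (4 + i) (PySem.Int.mod st.2 256), PySem.Int.floordiv st.2 256))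
    (msg, command)
  st.1

-- ===== PORT B =====
-- big_endian(n, k): the k base-256 digits of n, most significant first, by recursion on k.
def pvBigEndian (n : Int) (k : Nat) : List Int :=
  match k with
  | 0 => []
  | Nat.succ k' => pvBigEndian (PySem.Int.floordiv n 256) k' ++ [PySem.Int.mod n 256]

def send_nxt_command_py_alt (mail_box : Int) (command : Int) : List Int :=
  [0, 9, mail_box - 1, 5] ++ (pvBigEndian command 4).reverse ++ [0]

-- ===== PRECONDITION & SPEC =====
def Spec_send_nxt_command_py (mail_box : Int) (command : Int) (out : List Int) : Prop := out = send_nxt_command_py_alt mail_box command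
instance (mail_box : Int) (command : Int) (out : List Int) : Decidable (Spec_send_nxt_command_py mail_box command out) := by unfold Spec_send_nxt_command_py; infer_instance

-- ===== CLAIM (what is proved, stated in full; the proofs are below) =====
def Claim_equal_send_nxt_command_py : Prop := ∀ (mail_box : Int) (command : Int), Dom_send_nxt_command_py mail_box command → Spec_send_nxt_command_py mail_box command (send_nxt_command_py mail_box command)

-- ===== LEMMAS AND PROOFS =====

-- ===== VERDICT (by name: the statement is the Claim_ definition above) =====
theorem send_nxt_command_py_spec : Claim_equal_send_nxt_command_py := by
  intro mail_box command _
  unfold Spec_send_nxt_command_py send_nxt_command_py send_nxt_command_py_alt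
  simp [pvBigEndian, show List.range 4 = [0, 1, 2, 3] from rfl, List.foldl, List.set]
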